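-- pv_equiv track=rewrite | github.com/immersedd/rjview | utils/graph_proc.py | find_connected_order
-- ===== SOURCE A (Python) =====
-- from collections import defaultdict
--
-- def find_connected_order(edges):
--     graph = defaultdict(list)
--     for edge in edges:
--         a, b = edge
--         graph[a].append(b)
--         graph[b].append(a)
--     def dfs(node, visited, order):
--         visited.add(node)
--         order.append(node)
--         for neighbour in graph[node]:
--             if neighbour not in visited:
--                 dfs(neighbour, visited, order)
--     visited = set()
--     orders = []
--     for node in graph:
--         if node not in visited:
--             order = []
--             dfs(node, visited, order)
--             orders.append(order)
--     return orders
-- ===== SOURCE B (Python) =====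
-- from collections import defaultdict
--
-- def find_connected_order(edges):
--     graph = defaultdict(list)
--     for a, b in edges:
--         graph[a].append(b)
--         graph[b].append(a)
--     visited = set()
--     orders = []
--     for start in graph:
--         if start in visited:
--             continue
--         order = []
--         stack = [start]
--         while stack:
--             node = stack.pop()
--             if node in visited:
--                 continue
--             visited.add(node)
--             order.append(node)
--             for nb in reversed(graph[node]):
--                 if nb not in visited:
--                     stack.append(nb)
--         orders.append(order)
--     return orders
-- ===== Notes on version B (the rewrite author's own statement) =====
-- stated objective: alternative
-- what changed: A's recursive dfs is replaced by an iterative explicit-stack DFS (push neighbours in reversed order, check visited at pop time), producing the identical preorder without recursion.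
import Mathlib
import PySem

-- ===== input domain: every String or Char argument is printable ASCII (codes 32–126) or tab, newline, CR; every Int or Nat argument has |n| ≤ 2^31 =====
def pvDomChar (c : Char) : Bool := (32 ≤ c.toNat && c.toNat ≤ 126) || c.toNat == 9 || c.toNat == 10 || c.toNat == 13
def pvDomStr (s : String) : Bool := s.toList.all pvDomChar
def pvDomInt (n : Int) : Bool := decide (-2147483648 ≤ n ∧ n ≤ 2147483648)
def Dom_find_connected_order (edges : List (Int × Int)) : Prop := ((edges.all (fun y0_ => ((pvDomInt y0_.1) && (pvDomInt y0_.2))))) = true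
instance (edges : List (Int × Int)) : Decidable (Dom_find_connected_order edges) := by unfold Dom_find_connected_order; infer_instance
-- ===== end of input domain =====

-- B replaces A's recursive dfs by an iterative explicit-stack DFS (reversed pushes, pop-time
-- visited check), same adjacency build and exact same output; objective: alternative.

-- shared helper: both Pythons build the adjacency defaultdict by the identical edge loop
def buildGraph (edges : List (Int × Int)) : PySem.Dict Int (List Int) :=
  edges.foldl (fun g e =>
    (g.modify e.1 [] (fun l => l ++ [e.2])).modify e.2 [] (fun l => l ++ [e.1]))
    PySem.Dict.empty

-- ===== PORT A =====
-- A's recursive dfs; fuel only makes the recursion total (g.keys.length is always enough,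
-- since each dfs call marks a previously unvisited key)
mutual
def dfsA (g : PySem.Dict Int (List Int)) (fuel : Nat) (node : Int) (v : PySem.Set Int)
    (ord : List Int) : PySem.Set Int × List Int :=
  match fuel with
  | 0 => (v, ord)
  | f+1 => dfsAn g f (g.getD node []) (v.add node) (ord ++ [node])
termination_by (fuel, 0)

-- the 'for neighbour in graph[node]' loop of A's dfs
def dfsAn (g : PySem.Dict Int (List Int)) (fuel : Nat) (l : List Int) (v : PySem.Set Int)
    (ord : List Int) : PySem.Set Int × List Int :=
  match l with
  | [] => (v, ord)
  | nb :: ns =>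
    if !(v.contains nb) then
      let p := dfsA g fuel nb v ord
      dfsAn g fuel ns p.1 p.2
    else dfsAn g fuel ns v ord
termination_by (fuel, l.length + 1)
end

def find_connected_order (edges : List (Int × Int)) : List (List Int) :=
  let g := buildGraph edges
  ((g.keys).foldl (fun (st : PySem.Set Int × List (List Int)) node =>
      if !(st.1.contains node) then
        let p := dfsA g g.keys.length node st.1 []
        (p.1, st.2 ++ [p.2])
      else st)
    (PySem.Set.empty, [])).2

-- ===== PORT B =====
-- number of graph keys not yet visited (termination measure of B's while loop)
def unvis (g : PySem.Dict Int (List Int)) (v : PySem.Set Int) : Nat :=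
  ((g.keys).filter (fun k => !(v.contains k))).length

theorem filter_len_mono {α : Type} (l : List α) (p q : α → Bool)
    (h : ∀ a, p a = true → q a = true) :
    (l.filter p).length ≤ (l.filter q).length := by
  induction l with
  | nil => simp
  | cons a l ih =>
    by_cases hp : p a = true
    · simp [List.filter, hp, h a hp]; omega
    · simp only [List.filter, Bool.not_eq_true] at *
      simp [hp]
      rcases q a <;> simp <;> omega

theorem filter_len_strict {α : Type} (l : List α) (p q : α → Bool)
    (h : ∀ a, p a = true → q a = true) (x : α) (hx : x ∈ l)
    (hpx : p x = false) (hqx : q x = true) :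
    (l.filter p).length < (l.filter q).length := by
  induction l with
  | nil => simp at hx
  | cons a l ih =>
    rcases List.mem_cons.mp hx with rfl | hx
    · have := filter_len_mono l p q h
      simp [List.filter, hpx, hqx]; omega
    · have := ih hx
      rcases hp : p a
      · rcases hq : q a <;> simp [List.filter, hp, hq] <;> omega
      · simp [List.filter, hp, h a hp]; omega

theorem unvis_add_lt (g : PySem.Dict Int (List Int)) (v : PySem.Set Int) (x : Int)
    (hx : x ∈ g.keys) (hv : v.contains x = false) :
    unvis g (v.add x) < unvis g v := by
  refine filter_len_strict _ _ _ ?_ x hx ?_ ?_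
  · intro a ha
    simp only [Bool.not_eq_true'] at ha ⊢
    rw [Bool.eq_false_iff] at ha ⊢
    intro hc
    exact ha ((PySem.Set.contains_iff _ a).mpr
      ((PySem.Set.mem_add v x a).mpr (Or.inl ((PySem.Set.contains_iff v a).mp hc))))
  · simp [PySem.Set.mem_add]
  · simp only [Bool.not_eq_true']
    exact hv

theorem unvis_add_eq (g : PySem.Dict Int (List Int)) (v : PySem.Set Int) (x : Int)
    (hx : x ∉ g.keys) :
    unvis g (v.add x) = unvis g v := by
  unfold unvis
  congr 1
  apply List.filter_congr
  intro a ha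
  have hax : a ≠ x := fun h => hx (h ▸ ha)
  simp [PySem.Set.mem_add, hax]

theorem getD_not_key (g : PySem.Dict Int (List Int)) (x : Int) (hx : x ∉ g.keys) :
    g.getD x [] = [] := by
  apply PySem.Dict.getD_of_not_contains
  rw [Bool.eq_false_iff]
  intro hc
  exact hx ((PySem.Dict.contains_iff_mem_keys g x).mp hc)

-- B's iterative DFS: pop, skip if visited, else mark/emit and push unvisited neighbours reversed
def loopB (g : PySem.Dict Int (List Int)) (v : PySem.Set Int) (stack : List Int) (ord : List Int) :
    PySem.Set Int × List Int :=
  match stack with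
  | [] => (v, ord)
  | node :: rest =>
    if v.contains node then loopB g v rest ord
    else
      let v' := v.add node
      let ord' := ord ++ [node]
      let stack' := ((g.getD node []).reverse).foldl
        (fun st nb => if !(v'.contains nb) then nb :: st else st) rest
      loopB g v' stack' ord'
termination_by (unvis g v, stack.length)
decreasing_by
  · apply Prod.Lex.right
    simp
  · rename_i hv
    rw [Bool.not_eq_true] at hv
    by_cases hk : node ∈ g.keys
    · exact Prod.Lex.left _ _ (unvis_add_lt g v node hk hv)
    · have h0 : g.getD node [] = [] := getD_not_key g node hk
      rw [unvis_add_eq g v node hk]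
      apply Prod.Lex.right
      simp [h0]

def find_connected_order_alt (edges : List (Int × Int)) : List (List Int) :=
  let g := buildGraph edges
  ((g.keys).foldl (fun (st : PySem.Set Int × List (List Int)) start =>
      if st.1.contains start then st
      else
        let p := loopB g st.1 [start] []
        (p.1, st.2 ++ [p.2]))
    (PySem.Set.empty, [])).2

-- ===== PRECONDITION & SPEC =====
def Spec_find_connected_order (edges : List (Int × Int)) (out : List (List Int)) : Prop := out = find_connected_order_alt edges
instance (edges : List (Int × Int)) (out : List (List Int)) : Decidable (Spec_find_connected_order edges out) := by unfold Spec_find_connected_order; infer_instance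

-- ===== CLAIM (what is proved, stated in full; the proofs are below) =====
def Claim_equal_find_connected_order : Prop := ∀ (edges : List (Int × Int)), Dom_find_connected_order edges → Spec_find_connected_order edges (find_connected_order edges)

-- ===== LEMMAS AND PROOFS =====

-- every adjacency entry of buildGraph is itself a key
def ClosedG (g : PySem.Dict Int (List Int)) : Prop :=
  ∀ k n, n ∈ g.getD k [] → n ∈ g.keys

theorem closed_step (g : PySem.Dict Int (List Int)) (a b : Int) (hg : ClosedG g) :
    ClosedG ((g.modify a [] (fun l => l ++ [b])).modify b [] (fun l => l ++ [a])) := by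
  intro k n hn
  have hget1 : ∀ m : Int, (g.modify a [] (fun l => l ++ [b])).getD m []
      = if m = a then g.getD a [] ++ [b] else g.getD m [] :=
    fun m => PySem.Dict.getD_modify g a m [] _
  have hk1 : ∀ m : Int, m ∈ (g.modify a [] (fun l => l ++ [b])).keys ↔ m = a ∨ m ∈ g.keys := by
    intro m
    rw [PySem.Dict.keys_modify, PySem.Dict.mem_keys_insert]
  have hk2 : ∀ m : Int,
      m ∈ ((g.modify a [] (fun l => l ++ [b])).modify b [] (fun l => l ++ [a])).keys
        ↔ m = b ∨ m ∈ (g.modify a [] (fun l => l ++ [b])).keys := by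
    intro m
    rw [PySem.Dict.keys_modify, PySem.Dict.mem_keys_insert]
  have hmem1 : ∀ m : Int, n ∈ (g.modify a [] (fun l => l ++ [b])).getD m [] →
      n = b ∨ n ∈ g.keys := by
    intro m hm
    rw [hget1 m] at hm
    by_cases hma : m = a
    · rw [if_pos hma] at hm
      rcases List.mem_append.mp hm with h | h
      · exact Or.inr (hg a n h)
      · exact Or.inl (List.mem_singleton.mp h)
    · rw [if_neg hma] at hm
      exact Or.inr (hg m n hm)
  rw [PySem.Dict.getD_modify] at hn
  rw [hk2, hk1]
  by_cases hkb : k = b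
  · rw [if_pos hkb] at hn
    rcases List.mem_append.mp hn with h | h
    · rcases hmem1 b h with h' | h'
      · exact Or.inl h'
      · exact Or.inr (Or.inr h')
    · exact Or.inr (Or.inl (List.mem_singleton.mp h))
  · rw [if_neg hkb] at hn
    rcases hmem1 k hn with h' | h'
    · exact Or.inl h'
    · exact Or.inr (Or.inr h')

theorem buildGraph_closed (edges : List (Int × Int)) : ClosedG (buildGraph edges) := by
  unfold buildGraph
  have h : ∀ (es : List (Int × Int)) (g : PySem.Dict Int (List Int)), ClosedG g →
      ClosedG (es.foldl (fun g e =>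
        (g.modify e.1 [] (fun l => l ++ [e.2])).modify e.2 [] (fun l => l ++ [e.1])) g) := by
    intro es
    induction es with
    | nil => intro g hgg; exact hgg
    | cons e es ih =>
      intro g hgg
      exact ih _ (closed_step g e.1 e.2 hgg)
  apply h
  intro k n hn
  rw [PySem.Dict.getD_empty] at hn
  simp at hn

theorem subset_add {v : PySem.Set Int} (x : Int) : v ⊆ v.add x := by
  intro y hy
  exact (PySem.Set.mem_add v x y).mpr (Or.inl hy)

theorem dfsAn_mono_of (g : PySem.Dict Int (List Int)) (fuel : Nat)
    (hA : ∀ node v ord, v ⊆ (dfsA g fuel node v ord).1) :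
    ∀ l v ord, v ⊆ (dfsAn g fuel l v ord).1 := by
  intro l
  induction l with
  | nil => intro v ord; simp [dfsAn]
  | cons nb ns ih =>
    intro v ord
    rw [dfsAn]
    cases v.contains nb
    · simp only [Bool.not_false, if_pos]
      exact List.Subset.trans (hA nb v ord) (ih _ _)
    · simp only [Bool.not_true, Bool.false_eq_true, if_false]
      exact ih _ _

theorem dfs_mono (g : PySem.Dict Int (List Int)) (fuel : Nat) :
    (∀ node v ord, v ⊆ (dfsA g fuel node v ord).1) ∧
    (∀ l v ord, v ⊆ (dfsAn g fuel l v ord).1) := by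
  induction fuel with
  | zero =>
    have hA : ∀ node v ord, v ⊆ (dfsA g 0 node v ord).1 := by
      intro node v ord; simp [dfsA]
    exact ⟨hA, dfsAn_mono_of g 0 hA⟩
  | succ f ih =>
    have hA : ∀ node v ord, v ⊆ (dfsA g (f + 1) node v ord).1 := by
      intro node v ord
      rw [dfsA]
      exact List.Subset.trans (subset_add node) (ih.2 _ _ _)
    exact ⟨hA, dfsAn_mono_of g (f + 1) hA⟩

theorem unvis_subset_le (g : PySem.Dict Int (List Int)) {v w : PySem.Set Int} (h : v ⊆ w) :
    unvis g w ≤ unvis g v := by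
  apply filter_len_mono
  intro a ha
  simp only [Bool.not_eq_true'] at ha ⊢
  rw [Bool.eq_false_iff] at ha ⊢
  intro hc
  exact ha ((PySem.Set.contains_iff w a).mpr (h ((PySem.Set.contains_iff v a).mp hc)))

theorem unvis_pos (g : PySem.Dict Int (List Int)) (v : PySem.Set Int) (x : Int)
    (hx : x ∈ g.keys) (hv : x ∉ v) : 1 ≤ unvis g v := by
  have hmem : x ∈ (g.keys).filter (fun k => !(v.contains k)) := by
    simp [List.mem_filter, hx, hv]
  unfold unvis
  have := List.length_pos_of_mem hmem
  omega

theorem push_eq (l : List Int) (v : PySem.Set Int) (rest : List Int) :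
    (l.reverse).foldl (fun st nb => if !(v.contains nb) then nb :: st else st) rest
      = l.filter (fun nb => !(v.contains nb)) ++ rest := by
  rw [List.foldl_reverse]
  induction l with
  | nil => simp
  | cons a l ih =>
    rw [List.foldr_cons, ih, List.filter_cons]
    cases v.contains a <;> simp

-- the statements of the two halves of the loop/dfs correspondence
def Pstmt (g : PySem.Dict Int (List Int)) (fuel : Nat) : Prop :=
  ∀ node v ord s, node ∈ g.keys → node ∉ v → unvis g v ≤ fuel →
    loopB g v (node :: s) ord =
      (let p := dfsA g fuel node v ord; loopB g p.1 s p.2)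

def Qstmt (g : PySem.Dict Int (List Int)) (fuel : Nat) : Prop :=
  ∀ l, (∀ n ∈ l, n ∈ g.keys) → ∀ v₀ v ord s, v₀ ⊆ v → unvis g v ≤ fuel →
    loopB g v ((l.filter (fun nb => !(v₀.contains nb))) ++ s) ord =
      (let p := dfsAn g fuel l v ord; loopB g p.1 s p.2)

theorem P_zero (g : PySem.Dict Int (List Int)) : Pstmt g 0 := by
  intro node v ord s hk hv hu
  have := unvis_pos g v node hk hv
  omega

theorem Q_step (g : PySem.Dict Int (List Int)) (fuel : Nat)
    (hP : Pstmt g fuel) : Qstmt g fuel := by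
  intro l
  induction l with
  | nil =>
    intro _ v₀ v ord s _ _
    simp [dfsAn]
  | cons nb ns ih =>
    intro hl v₀ v ord s hsub hu
    have hnbk : nb ∈ g.keys := hl nb (List.mem_cons_self ..)
    have hl' : ∀ n ∈ ns, n ∈ g.keys := fun n hn => hl n (List.mem_cons_of_mem _ hn)
    cases h0 : v₀.contains nb
    · -- nb not yet visited at push time: it is on the stack
      rw [List.filter_cons]
      simp only [h0, Bool.not_false, if_pos, List.cons_append]
      cases hv : v.contains nb
      · -- still unvisited at pop time: run the recursive dfs on it
        have hnv : nb ∉ v := by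
          intro hm
          rw [(PySem.Set.contains_iff v nb).mpr hm] at hv
          exact Bool.noConfusion hv
        rw [hP nb v ord ((ns.filter (fun nb => !(v₀.contains nb))) ++ s) hnbk hnv hu]
        rw [dfsAn]
        simp only [hv, Bool.not_false, if_pos]
        have hmono := (dfs_mono g fuel).1 nb v ord
        exact ih hl' v₀ _ _ s (List.Subset.trans hsub hmono)
          (Nat.le_trans (unvis_subset_le g hmono) hu)
      · -- already visited meanwhile: the pop-time check skips it
        rw [loopB]
        simp only [hv, if_pos]
        rw [dfsAn]
        simp only [hv, Bool.not_true, Bool.false_eq_true, if_false]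
        exact ih hl' v₀ v ord s hsub hu
    · -- visited at push time: never pushed, and dfs skips it too
      have hmem : nb ∈ v := hsub ((PySem.Set.contains_iff v₀ nb).mp h0)
      have hv : v.contains nb = true := (PySem.Set.contains_iff v nb).mpr hmem
      rw [List.filter_cons]
      simp only [h0, Bool.not_true, Bool.false_eq_true, if_false]
      rw [dfsAn]
      simp only [hv, Bool.not_true, Bool.false_eq_true, if_false]
      exact ih hl' v₀ v ord s hsub hu

theorem P_succ (g : PySem.Dict Int (List Int)) (hg : ClosedG g) (fuel : Nat)
    (hQ : Qstmt g fuel) : Pstmt g (fuel + 1) := by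
  intro node v ord s hk hv hu
  have hvc : v.contains node = false := by
    cases h : v.contains node
    · rfl
    · exact absurd ((PySem.Set.contains_iff v node).mp h) hv
  rw [loopB]
  simp only [hvc, Bool.false_eq_true, if_false]
  rw [push_eq]
  have hu' : unvis g (v.add node) ≤ fuel := by
    have := unvis_add_lt g v node hk hvc
    omega
  rw [hQ (g.getD node []) (fun n hn => hg node n hn) (v.add node) (v.add node)
    (ord ++ [node]) s (fun x hx => hx) hu']
  rw [dfsA]

theorem PQ_all (g : PySem.Dict Int (List Int)) (hg : ClosedG g) (fuel : Nat) :
    Pstmt g fuel ∧ Qstmt g fuel := by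
  induction fuel with
  | zero => exact ⟨P_zero g, Q_step g 0 (P_zero g)⟩
  | succ f ih =>
    have p := P_succ g hg f ih.2
    exact ⟨p, Q_step g (f + 1) p⟩

theorem unvis_le_keys (g : PySem.Dict Int (List Int)) (v : PySem.Set Int) :
    unvis g v ≤ g.keys.length := by
  unfold unvis
  exact List.length_filter_le _ _

-- ===== VERDICT (by name: the statement is the Claim_ definition above) =====
theorem find_connected_order_spec : Claim_equal_find_connected_order := by
  intro edges _
  unfold Spec_find_connected_order find_connected_order find_connected_order_alt
  have hg := buildGraph_closed edges
  set g := buildGraph edges with hgdef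
  dsimp only
  congr 1
  apply PySem.List.foldl_congr_mem
  intro st node hnode
  by_cases hc : node ∈ st.1
  · simp [hc]
  · have hcf : st.1.contains node = false := by
      cases h : st.1.contains node
      · rfl
      · exact absurd ((PySem.Set.contains_iff st.1 node).mp h) hc
    have hK := (PQ_all g hg g.keys.length).1 node st.1 [] [] hnode hc (unvis_le_keys g st.1)
    simp only [hcf, Bool.not_false, if_pos, Bool.false_eq_true, if_false]
    rw [hK]
    simp [loopB]
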